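-- pv_equiv track=rewrite | github.com/ElKrapulito/house-sell-scraper | url_generator.py | generate_filter
-- ===== SOURCE A (Python) =====
-- def generate_filter(index, combines, filters):
--     filter = {}
--     filter2 = {}
--     if len(combines) - 1 == index:
--         return filters
--     if index < 0:
--         return filters
--     if index == 0:
--         filter['beds'] = combines[index]
--         filter['baths'] = combines[index]
--         filters.append(filter)
--         return generate_filter(index + 1, combines, filters)
--     filter['beds'] = combines[index]
--     filter['baths'] = combines[index]
--     filters.append(filter)
--     filter2['beds'] = filter['beds']
--     filter2['baths'] = combines[index - 1]
--     filters.append(filter2)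
--     return generate_filter(index + 1, combines, filters)
-- ===== SOURCE B (Python) =====
-- def generate_filter(index, combines, filters):
--     if index >= 0:
--         for i in range(index, len(combines) - 1):
--             filters.append({'beds': combines[i], 'baths': combines[i]})
--             if i != 0:
--                 filters.append({'beds': combines[i], 'baths': combines[i - 1]})
--     return filters
-- ===== Notes on version B (the rewrite author's own statement) =====
-- stated objective: simpler
-- what changed: Replaces the linear tail recursion with a single for-loop over range(index, len(combines)-1), appending the one or two filter dicts per position directly.
import Mathlib
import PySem

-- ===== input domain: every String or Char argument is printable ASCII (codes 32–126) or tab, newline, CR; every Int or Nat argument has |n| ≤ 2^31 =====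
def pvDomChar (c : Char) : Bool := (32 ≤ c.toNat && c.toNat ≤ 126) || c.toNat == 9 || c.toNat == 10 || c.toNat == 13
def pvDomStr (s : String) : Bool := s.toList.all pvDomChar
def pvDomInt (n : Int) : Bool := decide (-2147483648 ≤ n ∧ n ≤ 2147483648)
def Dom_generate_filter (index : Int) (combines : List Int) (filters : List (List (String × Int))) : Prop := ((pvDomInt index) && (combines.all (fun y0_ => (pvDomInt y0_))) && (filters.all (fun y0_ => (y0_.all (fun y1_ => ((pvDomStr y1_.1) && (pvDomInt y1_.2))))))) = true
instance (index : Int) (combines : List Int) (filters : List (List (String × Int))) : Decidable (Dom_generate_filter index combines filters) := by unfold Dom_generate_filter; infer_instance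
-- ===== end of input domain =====

-- B replaces A's tail recursion with one for-loop over range(index, len-1); both
-- mutate `filters` in place identically, the theorems are about the return value.

-- ===== PORT A =====
-- Literal port of A's tail recursion; where Python's combines[index] raises
-- IndexError (pyGet? = none, outside Pre_) the port stops and returns filters.
def generate_filter (index : Int) (combines : List Int) (filters : List (List (String × Int))) : List (List (String × Int)) :=
  if (combines.length : Int) - 1 = index then filters
  else if index < 0 then filters
  else
    match _h : PySem.List.pyGet? combines index with
    | none => filters  -- Python raises IndexError here (excluded by Pre_)
    | some v =>
      if index = 0 then
        generate_filter (index + 1) combines (filters ++ [[("beds", v), ("baths", v)]])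
      else
        let w := (PySem.List.pyGet? combines (index - 1)).getD 0
        generate_filter (index + 1) combines
          (filters ++ [[("beds", v), ("baths", v)], [("beds", v), ("baths", w)]])
termination_by ((combines.length : Int) - index).toNat
decreasing_by
  all_goals
    have hlt : index < (combines.length : Int) := by
      by_contra hge
      have : PySem.List.pyGet? combines index = none := by
        rw [PySem.List.pyGet?_eq_none_iff]
        simp [PySem.Raise.InRange]; omega
      simp [this] at _h
    omega

-- ===== PORT B =====
def generate_filter_alt (index : Int) (combines : List Int) (filters : List (List (String × Int))) : List (List (String × Int)) :=
  if 0 ≤ index then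
    (PySem.List.pyRange index ((combines.length : Int) - 1) 1).foldl
      (fun acc i =>
        let v := (PySem.List.pyGet? combines i).getD 0
        let acc := acc ++ [[("beds", v), ("baths", v)]]
        if i ≠ 0 then
          acc ++ [[("beds", v), ("baths", (PySem.List.pyGet? combines (i - 1)).getD 0)]]
        else acc)
      filters
  else filters

-- ===== PRECONDITION & SPEC =====
-- Pre_ excludes exactly the inputs where A raises IndexError: index ≥ len(combines).
def Pre_generate_filter (index : Int) (combines : List Int) (filters : List (List (String × Int))) : Prop :=
  index < (combines.length : Int)
instance (index : Int) (combines : List Int) (filters : List (List (String × Int))) : Decidable (Pre_generate_filter index combines filters) := by unfold Pre_generate_filter; infer_instance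

def pvWitness_generate_filter : Int × List Int × (List (List (String × Int))) := (0, [1, 2, 3], [])

def Spec_generate_filter (index : Int) (combines : List Int) (filters : List (List (String × Int))) (out : List (List (String × Int))) : Prop := out = generate_filter_alt index combines filters
instance (index : Int) (combines : List Int) (filters : List (List (String × Int))) (out : List (List (String × Int))) : Decidable (Spec_generate_filter index combines filters out) := by unfold Spec_generate_filter; infer_instance

-- ===== CLAIM (what is proved, stated in full; the proofs are below) =====
def Claim_equal_generate_filter : Prop := ∀ (index : Int) (combines : List Int) (filters : List (List (String × Int))), Dom_generate_filter index combines filters → Pre_generate_filter index combines filters → Spec_generate_filter index combines filters (generate_filter index combines filters)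


-- ===== LEMMAS AND PROOFS =====

theorem generate_filter_eq_alt (index : Int) (combines : List Int) (filters : List (List (String × Int)))
    (hpre : index < (combines.length : Int)) :
    generate_filter index combines filters = generate_filter_alt index combines filters := by
  by_cases hend : (combines.length : Int) - 1 = index
  · rw [generate_filter]
    simp only [hend]
    unfold generate_filter_alt
    rw [PySem.List.pyRange_one_eq_nil (by omega)]
    by_cases h : (0:Int) ≤ index <;> simp [h]
  · by_cases hneg : index < 0
    · rw [generate_filter]
      simp only [if_neg hend, if_pos hneg]
      unfold generate_filter_alt
      rw [if_neg (by omega)]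
    · -- 0 ≤ index < len - 1: one step of both programs, then recurse
      have hneg' : (0:Int) ≤ index := by omega
      have hget : PySem.List.pyGet? combines index = some combines[index.toNat] := by
        rw [PySem.List.pyGet?_of_nonneg (h := hneg')]
        exact List.getElem?_eq_getElem (by omega)
      rw [generate_filter]
      simp only [if_neg hend, if_neg (by omega : ¬ index < 0)]
      have halt : ∀ f : List (List (String × Int)),
          generate_filter_alt index combines f =
          generate_filter_alt (index + 1) combines
            (if index = 0 then f ++ [[("beds", combines[index.toNat]), ("baths", combines[index.toNat])]]
             else f ++ [[("beds", combines[index.toNat]), ("baths", combines[index.toNat])],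
                        [("beds", combines[index.toNat]),
                         ("baths", (PySem.List.pyGet? combines (index - 1)).getD 0)]]) := by
        intro f
        unfold generate_filter_alt
        rw [if_pos hneg', if_pos (by omega : (0:Int) ≤ index + 1)]
        rw [PySem.List.pyRange_one_cons (by omega)]
        simp only [List.foldl_cons, hget]
        by_cases h0 : index = 0
        · simp [h0]
        · simp [h0]
      split
      · rename_i hg; rw [hget] at hg; exact absurd hg (by simp)
      · rename_i v hg
        rw [hget] at hg
        injection hg with hv
        subst hv
        by_cases h0 : index = 0
        · rw [if_pos h0,
            generate_filter_eq_alt (index + 1) combines _ (by omega), halt, if_pos h0]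
        · rw [if_neg h0,
            generate_filter_eq_alt (index + 1) combines _ (by omega), halt, if_neg h0]
termination_by ((combines.length : Int) - index).toNat
decreasing_by all_goals omega

-- ===== VERDICT (by name: the statement is the Claim_ definition above) =====
theorem generate_filter_spec : Claim_equal_generate_filter := by
  intro index combines filters _ hpre
  exact generate_filter_eq_alt index combines filters hpre
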